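-- pv_equiv track=rewrite | github.com/zeroxf89/agenticSeek | sources/agent.py | remove_blocks
-- ===== SOURCE A (Python) =====
-- def remove_blocks(text: str) -> str:
--     """
--     Remove all code/query blocks within a tag from the answer text.
--     """
--     tag = f'```'
--     lines = text.split('\n')
--     post_lines = []
--     in_block = False
--     block_idx = 0
--     for line in lines:
--         if tag in line and not in_block:
--             in_block = True
--             continue
--         if not in_block:
--             post_lines.append(line)
--         if tag in line:
--             in_block = False
--             post_lines.append(f"block:{block_idx}")
--             block_idx += 1
--     return "\n".join(post_lines)
-- ===== SOURCE B (Python) =====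
-- def remove_blocks(text: str) -> str:
--     lines = text.split('\n')
--     out = []
--     block_idx = 0
--     i = 0
--     n = len(lines)
--     while i < n:
--         if '```' not in lines[i]:
--             out.append(lines[i])
--             i += 1
--             continue
--         # opening fence: scan forward for the closing fence line
--         j = i + 1
--         while j < n and '```' not in lines[j]:
--             j += 1
--         if j == n:
--             break  # unclosed fence: drop the rest, no marker
--         out.append(f"block:{block_idx}")
--         block_idx += 1
--         i = j + 1
--     return "\n".join(out)
-- ===== Notes on version B (the rewrite author's own statement) =====
-- stated objective: simpler
-- what changed: Replaces A's per-line in_block flag state machine with an index-driven while loop that, on an opening fence, scans forward for the closing fence and jumps straight past it (emitting one marker), stopping outright on an unclosed fence.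
import Mathlib
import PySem

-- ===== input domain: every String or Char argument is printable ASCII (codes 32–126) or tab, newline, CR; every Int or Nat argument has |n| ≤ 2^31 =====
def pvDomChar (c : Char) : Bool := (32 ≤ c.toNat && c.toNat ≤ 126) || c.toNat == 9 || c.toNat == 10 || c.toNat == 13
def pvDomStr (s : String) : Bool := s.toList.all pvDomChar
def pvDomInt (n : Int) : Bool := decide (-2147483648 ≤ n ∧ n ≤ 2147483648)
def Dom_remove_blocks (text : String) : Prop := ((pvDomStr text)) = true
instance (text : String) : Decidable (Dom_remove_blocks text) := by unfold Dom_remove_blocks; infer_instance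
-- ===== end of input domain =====

-- B replaces A's in_block flag state machine with an index-driven scan that jumps from an
-- opening fence directly past its closing fence (objective: simpler decomposition, same cost).

-- ===== PORT A =====
-- one step of A's for-loop over lines; state = (post_lines, in_block, block_idx)
def pvStepA (st : List String × Bool × Int) (line : String) : List String × Bool × Int :=
  let (post, inb, idx) := st
  if PySem.Str.isIn "```" line && !inb then (post, true, idx)
  else
    let post := if !inb then post ++ [line] else post
    if PySem.Str.isIn "```" line then (post ++ ["block:" ++ PySem.Int.toStr idx], false, idx + 1)
    else (post, inb, idx)

def remove_blocks (text : String) : String :=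
  let lines := (PySem.Str.split? text "\n").getD []   -- sep = "\n" ≠ "", split? is exact here
  let res := lines.foldl pvStepA ([], false, 0)
  PySem.Str.join "\n" res.1

-- ===== PORT B =====
-- the inner `while j < n and '```' not in lines[j]` scan of Source B:
-- returns the lines just past the closing fence line, or none if j reached n (unclosed fence)
def pvFindClose : List String → Option (List String)
  | [] => none
  | l :: ls => if PySem.Str.isIn "```" l then some ls else pvFindClose ls

theorem pvFindClose_length : ∀ (ls rest : List String), pvFindClose ls = some rest → rest.length < ls.length := by
  intro ls
  induction ls with
  | nil => intro rest h; simp [pvFindClose] at h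
  | cons l ls ih =>
    intro rest h
    rw [pvFindClose] at h
    by_cases hc : PySem.Str.isIn "```" l = true
    · rw [if_pos hc] at h
      obtain rfl := Option.some.inj h
      simp [List.length_cons]
    · rw [if_neg hc] at h
      have := ih rest h
      simp only [List.length_cons]; omega

-- Source B's outer while loop, recursing on the remaining lines (the suffix from index i)
def pvLoopB (idx : Int) : List String → List String
  | [] => []
  | l :: ls =>
    if PySem.Str.isIn "```" l then
      match h : pvFindClose ls with
      | none => []                                                -- unclosed fence: stop
      | some rest => ("block:" ++ PySem.Int.toStr idx) :: pvLoopB (idx + 1) rest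
    else l :: pvLoopB idx ls
termination_by ls => ls.length
decreasing_by
  · have := pvFindClose_length ls rest h
    simp only [List.length_cons]; omega
  · simp only [List.length_cons]; omega

def remove_blocks_alt (text : String) : String :=
  PySem.Str.join "\n" (pvLoopB 0 ((PySem.Str.split? text "\n").getD []))

-- ===== PRECONDITION & SPEC =====
def Spec_remove_blocks (text : String) (out : String) : Prop := out = remove_blocks_alt text
instance (text : String) (out : String) : Decidable (Spec_remove_blocks text out) := by unfold Spec_remove_blocks; infer_instance

-- ===== CLAIM (what is proved, stated in full; the proofs are below) =====
def Claim_equal_remove_blocks : Prop := ∀ (text : String), Dom_remove_blocks text → Spec_remove_blocks text (remove_blocks text)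

-- ===== LEMMAS AND PROOFS =====

-- what A's loop produces from inside a block, expressed with B's pieces
def pvInBlock (idx : Int) (ls : List String) : List String :=
  match pvFindClose ls with
  | none => []
  | some rest => ("block:" ++ PySem.Int.toStr idx) :: pvLoopB (idx + 1) rest

theorem pvLoopB_cons (idx : Int) (l : String) (ls : List String) :
    pvLoopB idx (l :: ls) =
      if PySem.Str.isIn "```" l then pvInBlock idx ls else l :: pvLoopB idx ls := by
  by_cases hc : PySem.Str.isIn "```" l = true
  · rw [pvLoopB, if_pos hc, if_pos hc]
    cases hfc : pvFindClose ls <;> simp [pvInBlock, hfc]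
  · rw [pvLoopB, if_neg hc, if_neg hc]

theorem pvLoop_eq : ∀ (ls : List String) (acc : List String) (b : Bool) (idx : Int),
    (ls.foldl pvStepA (acc, b, idx)).1 =
      acc ++ (if b then pvInBlock idx ls else pvLoopB idx ls) := by
  intro ls
  induction ls with
  | nil => intro acc b idx; cases b <;> simp [pvInBlock, pvFindClose, pvLoopB]
  | cons l ls ih =>
    intro acc b idx
    rw [List.foldl_cons]
    by_cases hc : PySem.Str.isIn "```" l = true
    · cases b with
      | false =>
        rw [show pvStepA (acc, false, idx) l = (acc, true, idx) by
              simp only [pvStepA, hc, Bool.not_false, Bool.and_true]; rfl]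
        rw [ih, pvLoopB_cons, if_pos hc]
        simp
      | true =>
        rw [show pvStepA (acc, true, idx) l
              = (acc ++ ["block:" ++ PySem.Int.toStr idx], false, idx + 1) by
              simp only [pvStepA, hc, Bool.not_true, Bool.and_false]; rfl]
        rw [ih]
        rw [show pvInBlock idx (l :: ls)
              = ("block:" ++ PySem.Int.toStr idx) :: pvLoopB (idx + 1) ls by
              rw [pvInBlock, pvFindClose, if_pos hc]]
        simp
    · have hc' : PySem.Str.isIn "```" l = false := by simpa using hc
      cases b with
      | false =>
        rw [show pvStepA (acc, false, idx) l = (acc ++ [l], false, idx) by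
              simp only [pvStepA, hc', Bool.false_and]; rfl]
        rw [ih, pvLoopB_cons, if_neg hc]
        simp
      | true =>
        rw [show pvStepA (acc, true, idx) l = (acc, true, idx) by
              simp only [pvStepA, hc', Bool.false_and]; rfl]
        rw [ih]
        rw [show pvInBlock idx (l :: ls) = pvInBlock idx ls by
              rw [pvInBlock, pvFindClose, if_neg hc, pvInBlock]]
        simp

-- ===== VERDICT (by name: the statement is the Claim_ definition above) =====
theorem remove_blocks_spec : Claim_equal_remove_blocks := by
  intro text _
  unfold Spec_remove_blocks remove_blocks remove_blocks_alt
  simp only [pvLoop_eq, List.nil_append, Bool.false_eq_true, if_false]
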